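-- pv_equiv track=rewrite | github.com/Ugbot/Sabot | sabot/redis/async_redis.py | _check_cluster_health
-- ===== SOURCE A (Python) =====
-- from typing import Dict, List, Optional, Any, Union, Callable
--
-- def _check_cluster_health(nodes: List[Dict], slots: List) -> bool:
--     """Check if cluster is healthy"""
--     if not nodes or not slots:
--         return False
--
--     # Check if we have at least one master
--     masters = [n for n in nodes if 'master' in n.get('flags', '').lower()]
--     if not masters:
--         return False
--
--     # Check if slots are covered
--     covered_slots = set()
--     for slot_range in slots:
--         if len(slot_range) >= 3:
--             start_slot, end_slot = slot_range[0], slot_range[1]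
--             for slot in range(start_slot, end_slot + 1):
--                 covered_slots.add(slot)
--
--     # Redis cluster has 16384 slots
--     return len(covered_slots) == 16384
-- ===== SOURCE B (Python) =====
-- def _check_cluster_health(nodes, slots):
--     """Check if cluster is healthy"""
--     if not nodes or not slots:
--         return False
--
--     # At least one master?
--     if not any('master' in n.get('flags', '').lower() for n in nodes):
--         return False
--
--     # Count distinct covered slots by merging sorted intervals
--     intervals = sorted(
--         ((r[0], r[1]) for r in slots if len(r) >= 3 and r[0] <= r[1]),
--         key=lambda t: t[0],
--     )
--     total = 0
--     cur = None
--     for a, b in intervals: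
--         if cur is None:
--             cur = (a, b)
--         elif a <= cur[1] + 1:
--             if b > cur[1]:
--                 cur = (cur[0], b)
--         else:
--             total += cur[1] - cur[0] + 1
--             cur = (a, b)
--     if cur is not None:
--         total += cur[1] - cur[0] + 1
--     return total == 16384
-- ===== Notes on version B (the rewrite author's own statement) =====
-- stated objective: alternative
-- what changed: Instead of enumerating every slot of every range into a set and taking its size, B sorts the (start,end) intervals by start and sums the lengths of the merged intervals; the master check becomes an any() instead of building the list of masters.
import Mathlib
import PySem

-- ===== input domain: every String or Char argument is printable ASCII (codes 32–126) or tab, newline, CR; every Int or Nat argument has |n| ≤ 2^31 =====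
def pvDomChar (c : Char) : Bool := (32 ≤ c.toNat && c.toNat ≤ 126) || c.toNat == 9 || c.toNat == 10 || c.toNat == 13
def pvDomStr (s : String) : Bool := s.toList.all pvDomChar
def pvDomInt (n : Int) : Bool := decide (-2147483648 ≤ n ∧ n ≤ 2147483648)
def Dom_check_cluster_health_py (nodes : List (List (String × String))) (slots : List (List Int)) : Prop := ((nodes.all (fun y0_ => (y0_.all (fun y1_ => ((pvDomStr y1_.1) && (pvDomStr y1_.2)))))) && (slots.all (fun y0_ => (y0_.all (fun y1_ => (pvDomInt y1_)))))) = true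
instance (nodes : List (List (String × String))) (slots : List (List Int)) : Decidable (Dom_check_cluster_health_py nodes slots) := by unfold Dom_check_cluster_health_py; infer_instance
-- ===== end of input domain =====

-- B replaces A's per-slot set enumeration by sort-and-merge over the (start,end) intervals
-- (summing merged interval lengths instead of materialising every covered slot); the master
-- check becomes an any() instead of building the list of masters.

-- ===== PORT A =====
-- A: build covered_slots by adding every slot of every range to a set, then compare its size to 16384.
def check_cluster_health_py (nodes : List (List (String × String))) (slots : List (List Int)) : Bool :=
  if nodes = [] || slots = [] then false
  else
    let masters := nodes.filter (fun n =>
      PySem.Str.isIn "master" (PySem.Str.lower ((PySem.Dict.mk n).getD "flags" "")))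
    if masters = [] then false
    else
      let covered : PySem.Set Int := slots.foldl (fun cov r =>
        if 3 ≤ r.length then
          let start_slot := PySem.List.pyGetD r 0 0
          let end_slot := PySem.List.pyGetD r 1 0
          (PySem.List.pyRange start_slot (end_slot + 1) 1).foldl PySem.Set.add cov
        else cov) PySem.Set.empty
      PySem.Set.len covered == 16384

-- ===== PORT B =====
-- B helper: the merge loop over start-sorted intervals ('cur' is Python's cur, 'total' the running sum).
def pvMergeLoop : List (Int × Int) → Option (Int × Int) → Int → Int
  | [], none, total => total
  | [], some (cs, ce), total => total + (ce - cs + 1)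
  | (a, b) :: rest, none, total => pvMergeLoop rest (some (a, b)) total
  | (a, b) :: rest, some (cs, ce), total =>
      if a ≤ ce + 1 then
        if b > ce then pvMergeLoop rest (some (cs, b)) total
        else pvMergeLoop rest (some (cs, ce)) total
      else pvMergeLoop rest (some (a, b)) (total + (ce - cs + 1))

def check_cluster_health_py_alt (nodes : List (List (String × String))) (slots : List (List Int)) : Bool :=
  if nodes = [] || slots = [] then false
  else if !(nodes.any (fun n =>
      PySem.Str.isIn "master" (PySem.Str.lower ((PySem.Dict.mk n).getD "flags" "")))) then false
  else
    let intervals := PySem.List.sorted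
      ((slots.filter (fun r =>
          3 ≤ r.length && PySem.List.pyGetD r 0 0 ≤ PySem.List.pyGetD r 1 0)).map
        (fun r => (PySem.List.pyGetD r 0 0, PySem.List.pyGetD r 1 0)))
      (fun t => t.1) false
    pvMergeLoop intervals none 0 == 16384

-- ===== PRECONDITION & SPEC =====
def Spec_check_cluster_health_py (nodes : List (List (String × String))) (slots : List (List Int)) (out : Bool) : Prop := out = check_cluster_health_py_alt nodes slots
instance (nodes : List (List (String × String))) (slots : List (List Int)) (out : Bool) : Decidable (Spec_check_cluster_health_py nodes slots out) := by unfold Spec_check_cluster_health_py; infer_instance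

-- ===== CLAIM (what is proved, stated in full; the proofs are below) =====
def Claim_equal_check_cluster_health_py : Prop := ∀ (nodes : List (List (String × String))) (slots : List (List Int)), Dom_check_cluster_health_py nodes slots → Spec_check_cluster_health_py nodes slots (check_cluster_health_py nodes slots)

-- ===== LEMMAS AND PROOFS =====

-- The set of slots covered by a list of intervals, as a Finset.
noncomputable def pvU (xs : List (Int × Int)) : Finset Int :=
  (xs.map (fun p => Finset.Icc p.1 p.2)).foldr (· ∪ ·) ∅

theorem pvU_nil : pvU [] = ∅ := rfl

theorem pvU_cons (p : Int × Int) (xs : List (Int × Int)) :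
    pvU (p :: xs) = Finset.Icc p.1 p.2 ∪ pvU xs := rfl

theorem mem_pvU (x : Int) (xs : List (Int × Int)) :
    x ∈ pvU xs ↔ ∃ p ∈ xs, p.1 ≤ x ∧ x ≤ p.2 := by
  induction xs with
  | nil => simp [pvU_nil]
  | cons q rest ih => simp [pvU_cons, ih, Finset.mem_union, Finset.mem_Icc]

theorem pvU_perm {xs ys : List (Int × Int)} (h : xs.Perm ys) : pvU xs = pvU ys := by
  ext x; simp only [mem_pvU]
  constructor <;> rintro ⟨p, hp, hx⟩ <;> exact ⟨p, by
    first
      | exact ⟨h.mem_iff.mp hp, hx⟩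
      | exact ⟨h.mem_iff.mpr hp, hx⟩⟩

-- merge-loop invariant
theorem pvMergeLoop_spec (xs : List (Int × Int)) (cs ce total : Int)
    (hsorted : xs.Pairwise (fun p q => p.1 ≤ q.1))
    (hne : ∀ p ∈ xs, p.1 ≤ p.2)
    (hcs : cs ≤ ce)
    (hlo : ∀ p ∈ xs, cs ≤ p.1) :
    pvMergeLoop xs (some (cs, ce)) total
      = total + ((Finset.Icc cs ce ∪ pvU xs).card : Int) := by
  induction xs generalizing cs ce total with
  | nil =>
      simp [pvMergeLoop, pvU_nil, Int.card_Icc]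
      omega
  | cons p rest ih =>
      obtain ⟨a, b⟩ := p
      have hab : a ≤ b := hne (a, b) (List.mem_cons_self ..)
      have hcsa : cs ≤ a := hlo (a, b) (List.mem_cons_self ..)
      have hrest_sorted := hsorted.of_cons
      have hhead : ∀ q ∈ rest, a ≤ q.1 := (List.pairwise_cons.mp hsorted).1
      simp only [pvMergeLoop]
      by_cases h1 : a ≤ ce + 1
      · simp only [if_pos h1]
        by_cases h2 : b > ce
        · simp only [if_pos h2]
          rw [ih cs b total hrest_sorted (fun q hq => hne q (List.mem_cons_of_mem _ hq))
            (by omega) (fun q hq => le_trans hcsa (hhead q hq))]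
          have hset : Finset.Icc cs b ∪ pvU rest
              = Finset.Icc cs ce ∪ pvU ((a, b) :: rest) := by
            ext x
            simp only [pvU_cons, Finset.mem_union, Finset.mem_Icc]
            constructor
            · rintro (h | h)
              · by_cases hx : x ≤ ce
                · exact Or.inl ⟨h.1, hx⟩
                · exact Or.inr (Or.inl ⟨by omega, h.2⟩)
              · exact Or.inr (Or.inr h)
            · rintro (h | h | h)
              · exact Or.inl ⟨h.1, by omega⟩
              · exact Or.inl ⟨by omega, by omega⟩
              · exact Or.inr h
          rw [hset]
        · simp only [if_neg h2]
          rw [ih cs ce total hrest_sorted (fun q hq => hne q (List.mem_cons_of_mem _ hq))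
            hcs (fun q hq => le_trans hcsa (hhead q hq))]
          have hset : Finset.Icc cs ce ∪ pvU rest
              = Finset.Icc cs ce ∪ pvU ((a, b) :: rest) := by
            ext x
            simp only [pvU_cons, Finset.mem_union, Finset.mem_Icc]
            constructor
            · rintro (h | h)
              · exact Or.inl h
              · exact Or.inr (Or.inr h)
            · rintro (h | h | h)
              · exact Or.inl h
              · exact Or.inl ⟨by omega, by omega⟩
              · exact Or.inr h
          rw [hset]
      · simp only [if_neg h1]
        rw [ih a b (total + (ce - cs + 1)) hrest_sorted
          (fun q hq => hne q (List.mem_cons_of_mem _ hq)) hab hhead]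
        have hdisj : Disjoint (Finset.Icc cs ce) (Finset.Icc a b ∪ pvU rest) := by
          rw [Finset.disjoint_left]
          intro x hx hx2
          simp only [Finset.mem_Icc] at hx
          rcases Finset.mem_union.mp hx2 with h | h
          · simp only [Finset.mem_Icc] at h; omega
          · rcases (mem_pvU x rest).mp h with ⟨q, hq, hxq⟩
            have := hhead q hq
            omega
        have hc : ((Finset.Icc cs ce).card : Int) = ce - cs + 1 := by
          rw [Int.card_Icc]; omega
        rw [pvU_cons]
        dsimp only
        rw [Finset.card_union_of_disjoint hdisj]
        push_cast
        omega

theorem pvMergeLoop_start (xs : List (Int × Int))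
    (hsorted : xs.Pairwise (fun p q => p.1 ≤ q.1))
    (hne : ∀ p ∈ xs, p.1 ≤ p.2) :
    pvMergeLoop xs none 0 = ((pvU xs).card : Int) := by
  cases xs with
  | nil => simp [pvMergeLoop, pvU_nil]
  | cons p rest =>
      obtain ⟨a, b⟩ := p
      simp only [pvMergeLoop]
      rw [pvMergeLoop_spec rest a b 0 hsorted.of_cons
        (fun q hq => hne q (List.mem_cons_of_mem _ hq))
        (hne (a, b) (List.mem_cons_self ..))
        ((List.pairwise_cons.mp hsorted).1)]
      rw [pvU_cons]
      ring

-- A's covered set, flattened: foldl over slots with inner range-folds is Set.ofList of the flatMap.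
def pvRangeOf (r : List Int) : List Int :=
  if 3 ≤ r.length then
    PySem.List.pyRange (PySem.List.pyGetD r 0 0) (PySem.List.pyGetD r 1 0 + 1) 1
  else []

theorem pvCovered_eq_ofList (slots : List (List Int)) (s : PySem.Set Int) :
    slots.foldl (fun cov r =>
        if 3 ≤ r.length then
          (PySem.List.pyRange (PySem.List.pyGetD r 0 0) (PySem.List.pyGetD r 1 0 + 1) 1).foldl
            PySem.Set.add cov
        else cov) s
      = PySem.Set.update s (slots.flatMap pvRangeOf) := by
  induction slots generalizing s with
  | nil => simp [PySem.Set.update]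
  | cons r rest ih =>
      simp only [List.foldl_cons, List.flatMap_cons]
      rw [ih]
      unfold PySem.Set.update
      rw [List.foldl_append]
      unfold pvRangeOf
      split_ifs with h
      · rfl
      · rfl

theorem pvSet_len_eq_card (L : List Int) :
    PySem.Set.len (PySem.Set.ofList L) = (L.toFinset.card : Int) := by
  have hnd : (PySem.Set.ofList L).Nodup := PySem.Set.nodup_ofList L
  have hfin : (PySem.Set.ofList L).toFinset = L.toFinset := by
    ext x; simp [PySem.Set.mem_ofList L x]
  have hlen : (PySem.Set.ofList L).length = L.toFinset.card := by
    rw [← hfin]; exact (List.toFinset_card_of_nodup hnd).symm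
  simp [PySem.Set.len, hlen]

def pvIntervals (slots : List (List Int)) : List (Int × Int) :=
  (slots.filter (fun r =>
      3 ≤ r.length && PySem.List.pyGetD r 0 0 ≤ PySem.List.pyGetD r 1 0)).map
    (fun r => (PySem.List.pyGetD r 0 0, PySem.List.pyGetD r 1 0))

theorem pvFlat_toFinset (slots : List (List Int)) :
    (slots.flatMap pvRangeOf).toFinset = pvU (pvIntervals slots) := by
  ext x
  simp only [List.mem_toFinset, List.mem_flatMap, mem_pvU, pvIntervals, List.mem_map,
    List.mem_filter]
  constructor
  · rintro ⟨r, hr, hx⟩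
    unfold pvRangeOf at hx
    split_ifs at hx with h3
    · rw [PySem.List.mem_pyRange_one] at hx
      exact ⟨(PySem.List.pyGetD r 0 0, PySem.List.pyGetD r 1 0),
        ⟨r, ⟨hr, by simp only [Bool.and_eq_true, decide_eq_true_eq]; omega⟩, rfl⟩,
        by simp; omega⟩
    · simp at hx
  · rintro ⟨p, ⟨r, ⟨hr, hcond⟩, rfl⟩, hx1, hx2⟩
    simp only [Bool.and_eq_true, decide_eq_true_eq] at hcond
    refine ⟨r, hr, ?_⟩
    unfold pvRangeOf
    rw [if_pos (by exact_mod_cast hcond.1), PySem.List.mem_pyRange_one]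
    simp at hx1 hx2 ⊢
    omega

-- ===== VERDICT (by name: the statement is the Claim_ definition above) =====
theorem check_cluster_health_py_spec : Claim_equal_check_cluster_health_py := by
  intro nodes slots _
  unfold Spec_check_cluster_health_py
  simp only [check_cluster_health_py, check_cluster_health_py_alt]
  by_cases h0 : (decide (nodes = []) || decide (slots = [])) = true
  · rw [if_pos h0, if_pos h0]
  · rw [if_neg h0, if_neg h0]
    have hmaster : (nodes.filter (fun n =>
        PySem.Str.isIn "master" (PySem.Str.lower ((PySem.Dict.mk n).getD "flags" ""))) = [])
        ↔ (!(nodes.any (fun n =>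
        PySem.Str.isIn "master" (PySem.Str.lower ((PySem.Dict.mk n).getD "flags" ""))))) = true := by
      simp [List.filter_eq_nil_iff]
    by_cases hm : nodes.filter (fun n =>
        PySem.Str.isIn "master" (PySem.Str.lower ((PySem.Dict.mk n).getD "flags" ""))) = []
    · rw [if_pos hm, if_pos (hmaster.mp hm)]
    · rw [if_neg hm, if_neg (fun hh => hm (hmaster.mpr hh))]
      -- both sides count the distinct covered slots
      have hsorted : (PySem.List.sorted (pvIntervals slots) (fun t => t.1) false).Pairwise
          (fun p q => p.1 ≤ q.1) :=
        PySem.List.sorted_pairwise (pvIntervals slots) (fun t => t.1)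
      have hne : ∀ p ∈ PySem.List.sorted (pvIntervals slots) (fun t => t.1) false, p.1 ≤ p.2 := by
        intro p hp
        rw [PySem.List.mem_sorted] at hp
        simp only [pvIntervals, List.mem_map, List.mem_filter, Bool.and_eq_true,
          decide_eq_true_eq] at hp
        obtain ⟨r, ⟨_, _, hle⟩, rfl⟩ := hp
        exact hle
      have hperm : (PySem.List.sorted (pvIntervals slots) (fun t => t.1) false).Perm
          (pvIntervals slots) :=
        PySem.List.sorted_perm (pvIntervals slots) (fun t => t.1) false
      have hB := pvMergeLoop_start _ hsorted hne
      rw [pvU_perm hperm] at hB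
      have hA := pvCovered_eq_ofList slots PySem.Set.empty
      rw [hA]
      show (PySem.Set.len (PySem.Set.ofList (slots.flatMap pvRangeOf)) == (16384 : Int))
        = (pvMergeLoop (PySem.List.sorted (pvIntervals slots) (fun t => t.1) false) none 0
            == (16384 : Int))
      rw [pvSet_len_eq_card, pvFlat_toFinset, hB]
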